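-- pv_equiv track=rewrite | github.com/praekeltfoundation/gem-survey-tool | gems/core/csv_utils.py | process_header
-- ===== SOURCE A (Python) =====
-- def process_header(parts):
--     header_map = {}
--     survey_index = 0
--     survey_key_index = 0
--     contact_index = 0
--     contact_key_index = 0
--     date_index = 0
--     i = 0
--
--     for part in parts:
--         header_map[part] = i
--         name = part.lower()
--
--         if name == "survey":
--             survey_index = i
--         elif name == "survey_key":
--             survey_key_index = i
--         elif name == "msisdn":
--             contact_index = i
--         elif name == "key":
--             contact_key_index = i
--         elif name == "timestamp":
--             date_index = i
--
--         i = i + 1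
--
--     return header_map, survey_index, survey_key_index, contact_index, contact_key_index, date_index
-- ===== SOURCE B (Python) =====
-- def process_header(parts):
--     indexed = list(enumerate(parts))
--     header_map = {p: i for i, p in indexed}
--
--     def last_index(name):
--         for i, p in reversed(indexed):
--             if p.lower() == name:
--                 return i
--         return 0
--
--     return (header_map, last_index("survey"), last_index("survey_key"),
--             last_index("msisdn"), last_index("key"), last_index("timestamp"))
-- ===== Notes on version B (the rewrite author's own statement) =====
-- stated objective: alternative
-- what changed: Instead of one forward pass threading five accumulators through an if/elif chain, B builds the header map by comprehension and finds each special column by a separate backward search with early exit (first match from the right = A's last-wins overwrite).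
import Mathlib
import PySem

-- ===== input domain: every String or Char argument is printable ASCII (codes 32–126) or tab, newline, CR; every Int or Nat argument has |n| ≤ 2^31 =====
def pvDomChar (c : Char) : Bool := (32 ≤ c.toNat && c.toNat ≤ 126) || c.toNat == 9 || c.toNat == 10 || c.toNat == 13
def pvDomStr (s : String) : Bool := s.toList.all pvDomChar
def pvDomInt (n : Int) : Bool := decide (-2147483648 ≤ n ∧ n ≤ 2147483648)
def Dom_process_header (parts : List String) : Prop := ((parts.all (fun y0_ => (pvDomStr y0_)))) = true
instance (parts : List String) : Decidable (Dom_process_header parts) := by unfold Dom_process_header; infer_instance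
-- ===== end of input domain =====

-- B replaces A's single forward pass with five accumulators by a comprehension for the
-- header map plus a backward early-exit search per special column (alternative decomposition).

-- ===== PORT A =====
-- A's loop: one counter i, a header dict, and five accumulators updated by an elif chain.
def phLoopA : List String → PySem.Dict String Int → Int → Int → Int → Int → Int → Int →
    PySem.Dict String Int × Int × Int × Int × Int × Int
  | [], hm, s, sk, c, ck, d, _ => (hm, s, sk, c, ck, d)
  | part :: rest, hm, s, sk, c, ck, d, i =>
      let hm' := hm.insert part i
      let name := PySem.Str.lower part
      if name == "survey" then phLoopA rest hm' i sk c ck d (i + 1)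
      else if name == "survey_key" then phLoopA rest hm' s i c ck d (i + 1)
      else if name == "msisdn" then phLoopA rest hm' s sk i ck d (i + 1)
      else if name == "key" then phLoopA rest hm' s sk c i d (i + 1)
      else if name == "timestamp" then phLoopA rest hm' s sk c ck i (i + 1)
      else phLoopA rest hm' s sk c ck d (i + 1)

def process_header (parts : List String) : (List (String × Int)) × Int × Int × Int × Int × Int :=
  let r := phLoopA parts PySem.Dict.empty 0 0 0 0 0 0
  (r.1.items, r.2.1, r.2.2.1, r.2.2.2.1, r.2.2.2.2.1, r.2.2.2.2.2)

-- ===== PORT B =====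
-- B's last_index: walk the reversed indexed list, return the first (i, p) with p.lower() == name, else 0.
def phFind (k : String) : List (Int × String) → Int
  | [] => 0
  | p :: t => if PySem.Str.lower p.2 == k then p.1 else phFind k t

def process_header_alt (parts : List String) : (List (String × Int)) × Int × Int × Int × Int × Int :=
  let indexed := PySem.List.enumerate parts 0
  let hm := indexed.foldl (fun d p => d.insert p.2 p.1) PySem.Dict.empty
  let rev := indexed.reverse
  (hm.items, phFind "survey" rev, phFind "survey_key" rev, phFind "msisdn" rev,
   phFind "key" rev, phFind "timestamp" rev)

-- ===== PRECONDITION & SPEC =====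
def Spec_process_header (parts : List String) (out : (List (String × Int)) × Int × Int × Int × Int × Int) : Prop := out = process_header_alt parts
instance (parts : List String) (out : (List (String × Int)) × Int × Int × Int × Int × Int) : Decidable (Spec_process_header parts out) := by unfold Spec_process_header; infer_instance

-- ===== CLAIM (what is proved, stated in full; the proofs are below) =====
def Claim_equal_process_header : Prop := ∀ (parts : List String), Dom_process_header parts → Spec_process_header parts (process_header parts)

-- ===== LEMMAS AND PROOFS =====

-- scalar view of one of A's accumulators: last index in the list whose lowered name is k
def phScan (k : String) (l : List (Int × String)) (acc : Int) : Int :=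
  l.foldl (fun a p => if PySem.Str.lower p.2 == k then p.1 else a) acc

-- phFind generalized over the default returned when no element matches
def phFindAcc (k : String) (l : List (Int × String)) (acc : Int) : Int :=
  match l with
  | [] => acc
  | p :: t => if PySem.Str.lower p.2 == k then p.1 else phFindAcc k t acc

lemma phScan_cons (k : String) (p : Int × String) (l : List (Int × String)) (acc : Int) :
    phScan k (p :: l) acc = phScan k l (if PySem.Str.lower p.2 == k then p.1 else acc) := rfl

lemma phFindAcc_append (k : String) (l₁ l₂ : List (Int × String)) (acc : Int) :
    phFindAcc k (l₁ ++ l₂) acc = phFindAcc k l₁ (phFindAcc k l₂ acc) := by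
  induction l₁ with
  | nil => rfl
  | cons p t ih => simp only [List.cons_append, phFindAcc, ih]

-- A's forward last-wins scan equals B's backward first-match search
lemma phScan_eq_findAcc (k : String) (l : List (Int × String)) (acc : Int) :
    phScan k l acc = phFindAcc k l.reverse acc := by
  induction l generalizing acc with
  | nil => rfl
  | cons p t ih =>
      rw [phScan_cons, ih, List.reverse_cons, phFindAcc_append]
      rfl

lemma phFindAcc_zero (k : String) (l : List (Int × String)) :
    phFindAcc k l 0 = phFind k l := by
  induction l with
  | nil => rfl
  | cons p t ih => simp only [phFindAcc, phFind, ih]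

lemma phScan_eq_find (k : String) (l : List (Int × String)) :
    phScan k l 0 = phFind k l.reverse := by
  rw [phScan_eq_findAcc, phFindAcc_zero]

lemma phLoopA_eq (parts : List String) :
    ∀ (hm : PySem.Dict String Int) (s sk c ck d i : Int),
    phLoopA parts hm s sk c ck d i =
      ((PySem.List.enumerate parts i).foldl (fun m p => m.insert p.2 p.1) hm,
       phScan "survey" (PySem.List.enumerate parts i) s,
       phScan "survey_key" (PySem.List.enumerate parts i) sk,
       phScan "msisdn" (PySem.List.enumerate parts i) c,
       phScan "key" (PySem.List.enumerate parts i) ck,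
       phScan "timestamp" (PySem.List.enumerate parts i) d) := by
  induction parts with
  | nil => intro hm s sk c ck d i; rfl
  | cons part rest ih =>
      intro hm s sk c ck d i
      simp only [phLoopA, PySem.List.enumerate_cons, List.foldl_cons, phScan_cons]
      by_cases h1 : PySem.Str.lower part = "survey"
      · simp [h1, ih]
      · by_cases h2 : PySem.Str.lower part = "survey_key"
        · simp [h2, ih]
        · by_cases h3 : PySem.Str.lower part = "msisdn"
          · simp [h3, ih]
          · by_cases h4 : PySem.Str.lower part = "key"
            · simp [h4, ih]
            · by_cases h5 : PySem.Str.lower part = "timestamp"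
              · simp [h5, ih]
              · simp [h1, h2, h3, h4, h5, ih]

-- ===== VERDICT (by name: the statement is the Claim_ definition above) =====
theorem process_header_spec : Claim_equal_process_header := by
  intro parts _
  show process_header parts = process_header_alt parts
  simp only [process_header, process_header_alt, phLoopA_eq, phScan_eq_find]
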